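-- pv_equiv track=rewrite | github.com/algorithmica-repository/SCIS-TOP20ADV-PYTHON | greedy thinking - II/min coin change.py | minCoins11
-- ===== SOURCE A (Python) =====
-- def minCoins11(n, b, s):
--     ncoins = 0
--     for i in range(n-1, -1, -1):
--         if(s <= 0):
--             break
--         denom = pow(b, i)
--         if(denom <= s):
--             ncoins += (s//denom)
--             s = s % denom
--     return ncoins
-- ===== SOURCE B (Python) =====
-- def minCoins11(n, b, s):
--     # least-significant-first digit extraction: peel low digits of s by repeated
--     # divmod by b over at most n-1 places, then add the remaining top quotient
--     if n <= 0 or s <= 0: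
--         return 0
--     total = 0
--     k = n - 1
--     while k > 0 and s > 0:
--         total += s % b
--         s //= b
--         k -= 1
--     return total + s
-- ===== Notes on version B (the rewrite author's own statement) =====
-- stated objective: faster
-- what changed: Replaces the high-to-low greedy loop that computes pow(b,i) at every place by a low-to-high while loop peeling one digit of s per step with a single divmod by b and adding the remaining quotient at the top place; the quotient reaches 0 after about log_b(s) steps so the loop stops early instead of iterating all n places with big-integer powers.
-- outside the precondition, e.g. on minCoins11(3, -2, 5): A returns 0, B returns -4
import Mathlib
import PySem

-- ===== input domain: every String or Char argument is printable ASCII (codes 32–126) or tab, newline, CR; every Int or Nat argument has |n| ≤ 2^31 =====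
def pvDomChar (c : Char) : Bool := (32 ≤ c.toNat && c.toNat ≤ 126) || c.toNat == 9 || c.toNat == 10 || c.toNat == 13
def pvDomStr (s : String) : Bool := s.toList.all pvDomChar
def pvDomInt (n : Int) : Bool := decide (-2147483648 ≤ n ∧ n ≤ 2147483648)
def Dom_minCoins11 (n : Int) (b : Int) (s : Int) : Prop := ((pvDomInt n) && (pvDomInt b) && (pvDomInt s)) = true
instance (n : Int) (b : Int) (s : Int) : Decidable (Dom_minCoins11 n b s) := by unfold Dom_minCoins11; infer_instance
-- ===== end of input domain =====

-- B replaces A's high-to-low greedy loop (pow(b,i) each step, shrinking remainder modulo b^i)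
-- by a low-to-high digit-peeling while loop, one divmod by b per step (objective: faster; measured).

-- ===== PORT A =====
-- for i in range(n-1, -1, -1) with early 'break': counted down by the Nat fuel k,
-- current index i = k-1; k starts at n.toNat (= number of loop indices; 0 when n ≤ 0).
-- pow(b, i) with i ≥ 0 (every index of this range is ≥ 0) is ported as b ^ i, exact there.
def minCoins11_loop (b : Int) : Nat → Int × Int → Int × Int
  | 0, st => st
  | k+1, (ncoins, s) =>
    if s ≤ 0 then (ncoins, s)
    else
      let denom := b ^ k
      if denom ≤ s then
        minCoins11_loop b k (ncoins + PySem.Int.floordiv s denom, PySem.Int.mod s denom)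
      else
        minCoins11_loop b k (ncoins, s)

def minCoins11 (n : Int) (b : Int) (s : Int) : Int :=
  (minCoins11_loop b n.toNat (0, s)).1

-- ===== PORT B =====
-- while k > 0 and s > 0: the Nat fuel is the counter k itself (k = n-1 ≥ 0 at entry);
-- when the loop exits (either condition fails) Python returns total + s.
def minCoins11_altLoop (b : Int) : Nat → Int → Int → Int
  | 0, total, s => total + s
  | k+1, total, s =>
    if 0 < s then
      minCoins11_altLoop b k (total + PySem.Int.mod s b) (PySem.Int.floordiv s b)
    else total + s

def minCoins11_alt (n : Int) (b : Int) (s : Int) : Int :=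
  if n ≤ 0 ∨ s ≤ 0 then 0
  else minCoins11_altLoop b (n - 1).toNat 0 s

-- ===== PRECONDITION & SPEC =====
-- Pre_ restricts the base to the function's natural domain: with b ≤ 0, n ≥ 1 and s ≥ 1,
-- b is not a coin system — A raises ZeroDivisionError (b = 0, n ≥ 2) or returns an accidental
-- value produced by alternating-sign powers (b < 0); with s ≤ 0 or n ≤ 0 both loops do nothing.
def Pre_minCoins11 (n : Int) (b : Int) (s : Int) : Prop := 1 ≤ b ∨ s ≤ 0 ∨ n ≤ 0
instance (n : Int) (b : Int) (s : Int) : Decidable (Pre_minCoins11 n b s) := by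
  unfold Pre_minCoins11; infer_instance
def pvWitness_minCoins11 : Int × Int × Int := (4, 3, 25)

def Spec_minCoins11 (n : Int) (b : Int) (s : Int) (out : Int) : Prop := out = minCoins11_alt n b s
instance (n : Int) (b : Int) (s : Int) (out : Int) : Decidable (Spec_minCoins11 n b s out) := by
  unfold Spec_minCoins11; infer_instance

-- ===== CLAIM (what is proved, stated in full; the proofs are below) =====
def Claim_equal_minCoins11 : Prop := ∀ (n : Int) (b : Int) (s : Int), Dom_minCoins11 n b s → Pre_minCoins11 n b s → Spec_minCoins11 n b s (minCoins11 n b s)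

-- ===== LEMMAS AND PROOFS =====

-- the common mathematical value: digit sum of s over k low places in base b, plus the rest
def digitRest (b : Int) : Nat → Int → Int
  | 0, s => s
  | k+1, s => PySem.Int.mod s b + digitRest b k (PySem.Int.floordiv s b)

theorem digitRest_zero {b : Int} (hb : 0 < b) (k : Nat) : digitRest b k 0 = 0 := by
  induction k with
  | zero => rfl
  | succ k ih =>
    simp [digitRest, PySem.Int.mod_eq_emod_of_pos hb, PySem.Int.floordiv_eq_ediv_of_pos hb, ih]

theorem emod_mul_ediv {b m : Int} (hb : 0 < b) (hm : 0 < m) (s : Int) :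
    (s % (b * m)) / b = (s / b) % m := by
  have hbm : (0:Int) < b * m := mul_pos hb hm
  have hr0 : 0 ≤ s % (b * m) := Int.emod_nonneg s (ne_of_gt hbm)
  have hr1 : s % (b * m) < b * m := Int.emod_lt_of_pos s hbm
  have hs : s = s % (b * m) + (m * (s / (b * m))) * b := by
    have h := Int.emod_add_mul_ediv s (b * m); linarith [h, mul_comm (b*m) (s/(b*m))]
  have h2 : s / b = s % (b * m) / b + m * (s / (b * m)) := by
    conv_lhs => rw [hs]
    exact Int.add_mul_ediv_right _ _ (ne_of_gt hb)
  rw [h2, Int.add_mul_emod_self_left]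
  exact (Int.emod_eq_of_lt (Int.ediv_nonneg hr0 (le_of_lt hb))
    ((Int.ediv_lt_iff_lt_mul hb).mpr (by rw [mul_comm m b]; exact hr1))).symm

theorem digitRest_succ (b : Int) (k : Nat) (s : Int) :
    digitRest b (k+1) s = PySem.Int.mod s b + digitRest b k (PySem.Int.floordiv s b) := rfl

theorem digitRest_bridge {b : Int} (hb : 0 < b) (k : Nat) :
    ∀ s : Int, 0 ≤ s →
      digitRest b (k+1) s
        = PySem.Int.floordiv s (b ^ (k+1)) + digitRest b k (PySem.Int.mod s (b ^ (k+1))) := by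
  induction k with
  | zero =>
    intro s _
    have h1 : b ^ (0+1) = b := pow_one b
    rw [digitRest_succ, h1]
    simp only [digitRest, PySem.Int.mod_eq_emod_of_pos hb, PySem.Int.floordiv_eq_ediv_of_pos hb]
    ring
  | succ k ih =>
    intro s hs
    have hbk : (0:Int) < b ^ (k+1) := pow_pos hb _
    have hbk2 : (0:Int) < b ^ (k+1+1) := pow_pos hb _
    have hfd : 0 ≤ PySem.Int.floordiv s b := by
      rw [PySem.Int.floordiv_eq_ediv_of_pos hb]; exact Int.ediv_nonneg hs (le_of_lt hb)
    rw [digitRest_succ b (k+1) s, ih _ hfd, digitRest_succ b k (PySem.Int.mod s (b ^ (k+1+1)))]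
    simp only [PySem.Int.mod_eq_emod_of_pos hb, PySem.Int.floordiv_eq_ediv_of_pos hb,
      PySem.Int.mod_eq_emod_of_pos hbk, PySem.Int.floordiv_eq_ediv_of_pos hbk,
      PySem.Int.mod_eq_emod_of_pos hbk2, PySem.Int.floordiv_eq_ediv_of_pos hbk2]
    have hpow : b ^ (k+1+1) = b * b ^ (k+1) := pow_succ' b (k+1)
    have e1 : (s / b) / b ^ (k+1) = s / b ^ (k+1+1) := by
      rw [Int.ediv_ediv_of_nonneg (le_of_lt hb), ← hpow]
    have e2 : (s % b ^ (k+1+1)) % b = s % b :=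
      Int.emod_emod_of_dvd s (dvd_pow_self b (Nat.succ_ne_zero _))
    have e3 : (s % b ^ (k+1+1)) / b = (s / b) % b ^ (k+1) := by
      rw [hpow]; exact emod_mul_ediv hb hbk s
    rw [e1, e2, e3]; ring

-- A's loop with fuel k+1 (indices k, k-1, …, 0) computes digitRest b k s
theorem loopA_eq {b : Int} (hb : 1 ≤ b) (k : Nat) :
    ∀ nc s : Int, 0 ≤ s →
      (minCoins11_loop b (k+1) (nc, s)).1 = nc + digitRest b k s := by
  have hb' : (0:Int) < b := hb
  induction k with
  | zero =>
    intro nc s hs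
    by_cases h0 : s ≤ 0
    · have : s = 0 := le_antisymm h0 hs
      subst this; simp [minCoins11_loop, digitRest]
    · have h1 : (1:Int) ≤ s := by omega
      rw [minCoins11_loop]
      simp only [if_neg h0, pow_zero, if_pos h1]
      simp [minCoins11_loop, digitRest]
  | succ k ih =>
    intro nc s hs
    by_cases h0 : s ≤ 0
    · have : s = 0 := le_antisymm h0 hs
      subst this
      simp [minCoins11_loop, digitRest_zero hb']
    · have hden : (0:Int) < b ^ (k+1) := pow_pos hb' _
      rw [minCoins11_loop]
      simp only [if_neg h0]
      by_cases hle : b ^ (k+1) ≤ s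
      · rw [if_pos hle, ih _ _ (by rw [PySem.Int.mod_eq_emod_of_pos hden]; exact Int.emod_nonneg s (ne_of_gt hden))]
        rw [digitRest_bridge hb' k s hs]; ring
      · rw [if_neg hle, ih _ _ hs]
        have hlt : s < b ^ (k+1) := by omega
        have : digitRest b (k+1) s = digitRest b k s := by
          rw [digitRest_bridge hb' k s hs, PySem.Int.floordiv_eq_ediv_of_pos hden,
            PySem.Int.mod_eq_emod_of_pos hden, Int.ediv_eq_zero_of_lt hs hlt,
            Int.emod_eq_of_lt hs hlt]
          ring
        rw [this]

-- B's while loop with counter k computes total + digitRest b k s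
theorem loopB_eq {b : Int} (hb : 1 ≤ b) (k : Nat) :
    ∀ total s : Int, 0 ≤ s →
      minCoins11_altLoop b k total s = total + digitRest b k s := by
  have hb' : (0:Int) < b := hb
  induction k with
  | zero => intro total s _; rfl
  | succ k ih =>
    intro total s hs
    by_cases h0 : 0 < s
    · have hfd : 0 ≤ PySem.Int.floordiv s b := by
        rw [PySem.Int.floordiv_eq_ediv_of_pos hb']; exact Int.ediv_nonneg hs (le_of_lt hb')
      rw [minCoins11_altLoop, if_pos h0, ih _ _ hfd, digitRest_succ]
      ring
    · have : s = 0 := by omega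
      subst this
      simp [minCoins11_altLoop, digitRest_zero hb']

-- ===== VERDICT (by name: the statement is the Claim_ definition above) =====
theorem minCoins11_spec : Claim_equal_minCoins11 := by
  intro n b s _ hpre
  unfold Spec_minCoins11 minCoins11 minCoins11_alt
  by_cases hn : n ≤ 0
  · have h0 : n.toNat = 0 := Int.toNat_of_nonpos hn
    rw [h0, if_pos (Or.inl hn)]; rfl
  · by_cases hs : s ≤ 0
    · have hk : n.toNat = (n-1).toNat + 1 := by omega
      rw [hk, if_pos (Or.inr hs)]
      simp [minCoins11_loop, hs]
    · have hb : 1 ≤ b := by rcases hpre with h | h | h <;> omega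
      have hs' : 0 ≤ s := by omega
      have hk : n.toNat = (n-1).toNat + 1 := by omega
      rw [hk, if_neg (by omega), loopA_eq hb _ 0 s hs', loopB_eq hb _ 0 s hs']
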